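-- pv_equiv track=rewrite | github.com/pedrosaints/IA-UFC-2020.2 | Trabalho2/2021Trabalho2-415083-AlgGenetico.py | selecionaMelhores
-- ===== SOURCE A (Python) =====
-- def selecionaMelhores(a):
-- 	melhor1 = 0
-- 	if a[1] < a[melhor1]:
-- 		melhor1 = 1
-- 		melhor2 = 0
-- 	else:
-- 		melhor2 = 1
-- 	for i in range(2,len(a)):
-- 		if a[i]<a[melhor1]:
-- 			melhor2 = melhor1
-- 			melhor1 = i
-- 		elif a[i]<a[melhor2]:
-- 			melhor2 = i
-- 	return melhor1,melhor2
-- ===== SOURCE B (Python) =====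
-- def selecionaMelhores(a):
-- 	idx = sorted(range(len(a)), key=a.__getitem__)
-- 	return idx[0], idx[1]
-- ===== Notes on version B (the rewrite author's own statement) =====
-- stated objective: idiomatic
-- what changed: Replaces the hand-rolled two-best scan (special-cased first two elements plus an index loop updating best/second-best) by stably sorting the index list by value and taking the first two sorted indices.
import Mathlib
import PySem

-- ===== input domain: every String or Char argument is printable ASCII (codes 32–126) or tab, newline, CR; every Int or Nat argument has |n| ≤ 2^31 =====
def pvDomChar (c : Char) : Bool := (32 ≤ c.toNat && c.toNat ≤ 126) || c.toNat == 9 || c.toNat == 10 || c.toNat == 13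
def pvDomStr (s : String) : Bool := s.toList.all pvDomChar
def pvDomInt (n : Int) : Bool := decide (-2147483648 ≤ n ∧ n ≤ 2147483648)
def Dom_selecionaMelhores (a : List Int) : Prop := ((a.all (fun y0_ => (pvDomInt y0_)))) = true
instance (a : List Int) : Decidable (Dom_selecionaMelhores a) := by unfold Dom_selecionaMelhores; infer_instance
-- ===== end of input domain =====

-- B replaces A's hand-rolled two-best scan by a stable sort of the index list by value,
-- returning the first two sorted indices (objective: simpler/idiomatic, not faster).

-- ===== PORT A =====
-- literal transliteration of A: special-case indices 0 and 1, then scan range(2, len(a))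
def selecionaMelhores (a : List Int) : Int × Int :=
  let init : Int × Int :=
    if PySem.List.pyGetD a 1 0 < PySem.List.pyGetD a 0 0 then (1, 0) else (0, 1)
  (PySem.List.pyRange 2 a.length 1).foldl
    (fun (m : Int × Int) i =>
      if PySem.List.pyGetD a i 0 < PySem.List.pyGetD a m.1 0 then (i, m.1)
      else if PySem.List.pyGetD a i 0 < PySem.List.pyGetD a m.2 0 then (m.1, i)
      else m) init

-- ===== PORT B =====
-- literal transliteration of B: idx = sorted(range(len(a)), key=a.__getitem__); return idx[0], idx[1]
def selecionaMelhores_alt (a : List Int) : Int × Int :=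
  let idx := PySem.List.sorted (PySem.List.pyRange 0 a.length 1) (fun i => PySem.List.pyGetD a i 0)
  (PySem.List.pyGetD idx 0 0, PySem.List.pyGetD idx 1 0)

-- ===== PRECONDITION & SPEC =====
-- A raises IndexError on lists of length < 2 (it reads a[1]); B raises there too (idx[1]).
def Pre_selecionaMelhores (a : List Int) : Prop := 2 ≤ a.length
instance (a : List Int) : Decidable (Pre_selecionaMelhores a) := by unfold Pre_selecionaMelhores; infer_instance

def pvWitness_selecionaMelhores : List Int := [3, 1, 2]

def Spec_selecionaMelhores (a : List Int) (out : Int × Int) : Prop := out = selecionaMelhores_alt a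
instance (a : List Int) (out : Int × Int) : Decidable (Spec_selecionaMelhores a out) := by unfold Spec_selecionaMelhores; infer_instance

-- ===== CLAIM (what is proved, stated in full; the proofs are below) =====
def Claim_equal_selecionaMelhores : Prop := ∀ (a : List Int), Dom_selecionaMelhores a → Pre_selecionaMelhores a → Spec_selecionaMelhores a (selecionaMelhores a)

-- ===== LEMMAS AND PROOFS =====

-- inserting into a list with at least two elements: the new first two elements
-- are exactly what A's loop body computes
theorem insertBy_two {key : Int → Int} (x m1 m2 : Int) (rest : List Int) :
    PySem.List.insertBy (fun p q => decide (key p < key q)) x (m1 :: m2 :: rest) =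
      if key x < key m1 then x :: m1 :: m2 :: rest
      else if key x < key m2 then m1 :: x :: m2 :: rest
      else m1 :: m2 :: PySem.List.insertBy (fun p q => decide (key p < key q)) x rest := by
  simp [PySem.List.insertBy]
  split_ifs <;> simp_all

-- loop invariant: folding insertBy over l from a state m1 :: m2 :: rest keeps the
-- first two elements equal to A's fold of its loop body over l from (m1, m2)
theorem inv_lemma (key : Int → Int) (l : List Int) :
    ∀ (m1 m2 : Int) (rest : List Int),
    ∃ rest',
      l.foldl (fun acc x => PySem.List.insertBy (fun p q => decide (key p < key q)) x acc)
          (m1 :: m2 :: rest) =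
        (l.foldl (fun (m : Int × Int) i =>
            if key i < key m.1 then (i, m.1)
            else if key i < key m.2 then (m.1, i)
            else m) (m1, m2)).1 ::
        (l.foldl (fun (m : Int × Int) i =>
            if key i < key m.1 then (i, m.1)
            else if key i < key m.2 then (m.1, i)
            else m) (m1, m2)).2 :: rest' := by
  induction l with
  | nil => intro m1 m2 rest; exact ⟨rest, rfl⟩
  | cons x l ih =>
    intro m1 m2 rest
    simp only [List.foldl_cons, insertBy_two]
    split_ifs with h1 h2
    · simpa [h1] using ih x m1 (m2 :: rest)
    · simpa [h1, h2] using ih m1 x (m2 :: rest)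
    · simpa [h1, h2] using ih m1 m2 _

theorem pyGetD_cons_zero (x y : Int) (r : List Int) : PySem.List.pyGetD (x :: y :: r) 0 0 = x := by
  simp [pysem]

theorem pyGetD_cons_one (x y : Int) (r : List Int) : PySem.List.pyGetD (x :: y :: r) 1 0 = y := by
  simp [pysem]

theorem selecionaMelhores_eq (a : List Int) (h : 2 ≤ a.length) :
    selecionaMelhores a = selecionaMelhores_alt a := by
  unfold selecionaMelhores selecionaMelhores_alt
  rw [PySem.List.sorted_eq_foldl_insertBy]
  rw [PySem.List.pyRange_one_append 0 2 (a.length : Int) (by omega) (by exact_mod_cast h)]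
  have h01 : PySem.List.pyRange 0 2 1 = [0, 1] := by decide
  rw [h01, List.foldl_append]
  have hstart : List.foldl (fun acc x =>
        PySem.List.insertBy (fun p q =>
          decide (PySem.List.pyGetD a p 0 < PySem.List.pyGetD a q 0)) x acc) [] [0, 1]
      = if PySem.List.pyGetD a 1 0 < PySem.List.pyGetD a 0 0 then [1, 0] else [0, 1] := by
    simp only [List.foldl_cons, List.foldl_nil, PySem.List.insertBy, decide_eq_true_eq]
  rw [hstart]
  by_cases hc : PySem.List.pyGetD a 1 0 < PySem.List.pyGetD a 0 0
  · rw [if_pos hc, if_pos hc]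
    obtain ⟨r, hr⟩ := inv_lemma (fun i => PySem.List.pyGetD a i 0)
      (PySem.List.pyRange 2 (a.length : Int) 1) 1 0 []
    simp only [hr, pyGetD_cons_zero, pyGetD_cons_one]
  · rw [if_neg hc, if_neg hc]
    obtain ⟨r, hr⟩ := inv_lemma (fun i => PySem.List.pyGetD a i 0)
      (PySem.List.pyRange 2 (a.length : Int) 1) 0 1 []
    simp only [hr, pyGetD_cons_zero, pyGetD_cons_one]

-- ===== VERDICT (by name: the statement is the Claim_ definition above) =====
theorem selecionaMelhores_spec : Claim_equal_selecionaMelhores := by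
  intro a _ hpre
  unfold Spec_selecionaMelhores
  exact selecionaMelhores_eq a hpre
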